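-- pv_equiv track=rewrite | github.com/thesgc/chembl_core_db | chembl_core_db/db/customManagers.py | get_smarts
-- ===== SOURCE A (Python) =====
-- def get_smarts(smiles):
--     """
--     Replaces the methyl carbon atoms with a smarts pattern for any carbon atom
--     """
--     if len(smiles) == 2:
--         return smiles
--     letters = list(smiles)
--     new_letters = []
--     previous = False
--     for index, letter in enumerate(letters):
--         if previous and letter == ")":
--             new_letters[index -1] = "[#6]"
--         if letter == "C":
--             if index == len(smiles) -1 or index == 0:
--                 new_letters.append("[#6]")
--                 continue
--             else:
--                 previous = True
--                 new_letters.append(letter)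
--                 continue
--         previous = False
--         new_letters.append(letter)
--     return "".join(new_letters)
-- ===== SOURCE B (Python) =====
-- def get_smarts(smiles):
--     if len(smiles) == 2:
--         return smiles
--     n = len(smiles)
--     return "".join(
--         "[#6]" if c == "C" and (i == 0 or i == n - 1 or smiles[i + 1] == ")") else c
--         for i, c in enumerate(smiles)
--     )
-- ===== Notes on version B (the rewrite author's own statement) =====
-- stated objective: simpler
-- what changed: Replaces A's stateful loop (a `previous` flag plus back-patching the already-appended element of the output list) with a stateless single comprehension that decides each character by looking ahead at its right neighbour.
import Mathlib
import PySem

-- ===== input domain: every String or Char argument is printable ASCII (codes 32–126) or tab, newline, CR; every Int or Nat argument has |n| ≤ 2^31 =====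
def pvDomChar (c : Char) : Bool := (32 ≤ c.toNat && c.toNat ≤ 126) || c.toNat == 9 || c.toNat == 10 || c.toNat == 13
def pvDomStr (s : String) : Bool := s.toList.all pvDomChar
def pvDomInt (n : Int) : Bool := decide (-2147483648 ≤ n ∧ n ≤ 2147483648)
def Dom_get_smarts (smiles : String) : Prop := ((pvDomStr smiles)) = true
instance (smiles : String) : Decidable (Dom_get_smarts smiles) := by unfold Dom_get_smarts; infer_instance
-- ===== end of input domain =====

-- B replaces A's `previous` flag and back-patching of the already-built output list with a
-- stateless look-ahead at the right neighbour: simpler, one expression per character, no mutation.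

-- ===== PORT A =====
-- A's loop: state = (index, previous, new_letters); the backpatch `new_letters[index-1] = "[#6]"`
-- is List.set, every branch in A's order.
def getSmartsLoopA (n : Nat) : List Char → Nat → Bool → List String → List String
  | [], _, _, acc => acc
  | letter :: rest, index, previous, acc =>
    let acc := if previous && letter == ')' then acc.set (index - 1) "[#6]" else acc
    if letter == 'C' then
      if index == n - 1 || index == 0 then
        getSmartsLoopA n rest (index + 1) previous (acc ++ ["[#6]"])
      else
        getSmartsLoopA n rest (index + 1) true (acc ++ [letter.toString])
    else
      getSmartsLoopA n rest (index + 1) false (acc ++ [letter.toString])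

def get_smarts (smiles : String) : String :=
  if smiles.toList.length == 2 then smiles
  else
    let letters := smiles.toList
    String.join (getSmartsLoopA letters.length letters 0 false [])

-- ===== PORT B =====
def get_smarts_alt (smiles : String) : String :=
  if smiles.toList.length == 2 then smiles
  else
    let letters := smiles.toList
    let n := letters.length
    String.join (letters.zipIdx.map (fun p =>
      if p.1 == 'C' && (p.2 == 0 || p.2 == n - 1 || letters.getD (p.2 + 1) ' ' == ')')
      then "[#6]" else p.1.toString))

-- ===== PRECONDITION & SPEC =====
def Spec_get_smarts (smiles : String) (out : String) : Prop := out = get_smarts_alt smiles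
instance (smiles : String) (out : String) : Decidable (Spec_get_smarts smiles out) := by unfold Spec_get_smarts; infer_instance

-- ===== CLAIM (what is proved, stated in full; the proofs are below) =====
def Claim_equal_get_smarts : Prop := ∀ (smiles : String), Dom_get_smarts smiles → Spec_get_smarts smiles (get_smarts smiles)

-- ===== LEMMAS AND PROOFS =====

-- B's value at position k, as a function of the full character list
def bCell (letters : List Char) (n k : Nat) : String :=
  if letters.getD k ' ' == 'C' && (k == 0 || k == n - 1 || letters.getD (k + 1) ' ' == ')')
  then "[#6]" else (letters.getD k ' ').toString

def bCells (letters : List Char) (n k : Nat) : List String :=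
  (List.range k).map (bCell letters n)

lemma bCells_succ (letters : List Char) (n k : Nat) :
    bCells letters n (k + 1) = bCells letters n k ++ [bCell letters n k] := by
  simp [bCells, List.range_succ]

lemma length_bCells (letters : List Char) (n k : Nat) :
    (bCells letters n k).length = k := by simp [bCells]

lemma set_append_singleton {α : Type} (xs : List α) (a v : α) :
    (xs ++ [a]).set xs.length v = xs ++ [v] := by
  induction xs with
  | nil => simp
  | cons x xs ih => simp [ih]

-- the loop invariant of A's fold: the output so far agrees with B's cells, except that
-- while `previous` is set the last emitted "C" is still awaiting a possible backpatch
lemma loopA_inv (letters : List Char) :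
    ∀ (l : List Char) (k : Nat) (previous : Bool) (acc : List String),
      letters.drop k = l → k ≤ letters.length →
      ((previous = true ∧ k < letters.length ∧ 2 ≤ k ∧
          letters.getD (k - 1) ' ' = 'C' ∧
          acc = bCells letters letters.length (k - 1) ++ ["C"]) ∨
        ((previous = true → k = letters.length) ∧
          acc = bCells letters letters.length k)) →
      getSmartsLoopA letters.length l k previous acc =
        bCells letters letters.length letters.length := by
  intro l
  induction l with
  | nil =>
    intro k previous acc hdrop hkle hinv
    have hk : letters.length ≤ k := by
      have := congrArg List.length hdrop
      simp at this; omega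
    have hkk : k = letters.length := by omega
    rcases hinv with ⟨_, hlt, _⟩ | ⟨_, hacc⟩
    · omega
    · simp [getSmartsLoopA, hacc, hkk]
  | cons letter rest ih =>
    intro k previous acc hdrop hkle hinv
    have hget : letters[k]? = some letter := by
      have h0 : (letters.drop k)[0]? = some letter := by rw [hdrop]; rfl
      simpa using h0
    have hklt : k < letters.length := (List.getElem?_eq_some_iff.mp hget).1
    have hgetD : letters.getD k ' ' = letter := by
      simp [List.getD, hget]
    have hdrop' : letters.drop (k + 1) = rest := by
      have h1 : letters.drop (k + 1) = (letters.drop k).drop 1 := by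
        rw [List.drop_drop]
      rw [h1, hdrop]; rfl
    rcases hinv with ⟨hprev, _, hk2, hC, hacc⟩ | ⟨hpk, hacc⟩
    · -- previous = true : pending "C" at position k-1
      subst hprev
      have hbk1 : bCell letters letters.length (k - 1) =
          (if letter = ')' then "[#6]" else "C") := by
        unfold bCell
        have h1 : (k - 1) + 1 = k := by omega
        have h2 : (k - 1 == 0) = false := by simp; omega
        have h3 : (k - 1 == letters.length - 1) = false := by simp; omega
        rw [h1, hgetD, hC, h2, h3]
        by_cases h : letter = ')'
        · simp [h]
        · simp [h]; rfl
      by_cases hpar : letter = ')'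
      · -- the backpatch fires
        subst hpar
        have hset : (bCells letters letters.length (k - 1) ++ ["C"]).set (k - 1) "[#6]"
            = bCells letters letters.length (k - 1) ++ ["[#6]"] := by
          have h := set_append_singleton (bCells letters letters.length (k - 1)) "C" "[#6]"
          rwa [length_bCells] at h
        have hacck : bCells letters letters.length (k - 1) ++ ["[#6]"]
            = bCells letters letters.length k := by
          have hk1 : k = (k - 1) + 1 := by omega
          rw [hk1, bCells_succ, hbk1]; simp
        have hbk : bCell letters letters.length k = ')'.toString := by
          unfold bCell; rw [hgetD]; simp
        simp only [getSmartsLoopA, hacc]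
        norm_num [hset, hacck]
        apply ih (k + 1) false _ hdrop' (by omega)
        right
        refine ⟨by simp, ?_⟩
        rw [bCells_succ, hbk]; rfl
      · -- no backpatch; the pending "C" is already B's cell
        have haccs : acc = bCells letters letters.length k := by
          have hk1 : k = (k - 1) + 1 := by omega
          rw [hacc, hk1, bCells_succ, hbk1, if_neg hpar]
          simp
        have hnoset : (true && letter == ')') = false := by simp [hpar]
        by_cases hc : letter = 'C'
        · subst hc
          by_cases hend : k = letters.length - 1
          · -- C at the last index: previous stays true but the loop is about to end
            have hbk : bCell letters letters.length k = "[#6]" := by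
              unfold bCell; rw [hgetD]; simp [hend]
            simp only [getSmartsLoopA, hnoset, Bool.false_eq_true, if_false, haccs]
            rw [if_pos (by simp), if_pos (by simp [hend]), ← hbk, ← bCells_succ]
            apply ih (k + 1) true _ hdrop' (by omega)
            right
            exact ⟨fun _ => by omega, rfl⟩
          · -- C in the middle: set previous, emit "C" pending
            simp only [getSmartsLoopA, hnoset, Bool.false_eq_true, if_false, haccs]
            rw [if_pos (by simp), if_neg (by simp; omega)]
            apply ih (k + 1) true _ hdrop' (by omega)
            left
            refine ⟨rfl, by omega, by omega, by simpa using hgetD, ?_⟩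
            simp only [Nat.add_sub_cancel]
            rfl
        · -- ordinary character
          have hbk : bCell letters letters.length k = letter.toString := by
            unfold bCell; rw [hgetD]; simp [hc]
          simp only [getSmartsLoopA, hnoset, Bool.false_eq_true, if_false, haccs]
          rw [if_neg (by simp [hc])]
          apply ih (k + 1) false _ hdrop' (by omega)
          right
          refine ⟨by simp, ?_⟩
          rw [bCells_succ, hbk]
    · -- previous = false (it cannot be true here, since k < length)
      have hpf : previous = false := by
        cases previous
        · rfl
        · exact absurd (hpk rfl) (by omega)
      subst hpf
      simp only [getSmartsLoopA, Bool.false_and, Bool.false_eq_true, if_false]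
      by_cases hc : letter = 'C'
      · subst hc
        by_cases hedge : k = letters.length - 1 ∨ k = 0
        · have hbk : bCell letters letters.length k = "[#6]" := by
            unfold bCell; rw [hgetD]
            rcases hedge with h | h <;> simp [h]
          rw [if_pos (by simp), if_pos (by rcases hedge with h | h <;> simp [h])]
          rw [hacc, ← hbk, ← bCells_succ]
          apply ih (k + 1) false _ hdrop' (by omega)
          right
          exact ⟨by simp, rfl⟩
        · push Not at hedge
          rw [if_pos (by simp), if_neg (by simp; omega)]
          apply ih (k + 1) true _ hdrop' (by omega)
          left
          refine ⟨rfl, by omega, by omega, by simpa using hgetD, ?_⟩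
          simp only [Nat.add_sub_cancel, hacc]
          rfl
      · have hbk : bCell letters letters.length k = letter.toString := by
          unfold bCell; rw [hgetD]; simp [hc]
        rw [if_neg (by simp [hc])]
        rw [hacc, ← hbk, ← bCells_succ]
        apply ih (k + 1) false _ hdrop' (by omega)
        right
        exact ⟨by simp, rfl⟩

-- B's zipIdx map equals the cell table
lemma zip_bridge (letters : List Char) :
    ∀ (l : List Char) (k : Nat), letters.drop k = l →
      (l.zipIdx k).map (fun p =>
        if p.1 == 'C' && (p.2 == 0 || p.2 == letters.length - 1 ||
            letters.getD (p.2 + 1) ' ' == ')')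
        then "[#6]" else p.1.toString)
      = (List.range' k l.length).map (bCell letters letters.length) := by
  intro l
  induction l with
  | nil => intro k _; rfl
  | cons c rest ih =>
    intro k hdrop
    have hget : letters[k]? = some c := by
      have h0 : (letters.drop k)[0]? = some c := by rw [hdrop]; rfl
      simpa using h0
    have hgetD : letters.getD k ' ' = c := by simp [List.getD, hget]
    have hdrop' : letters.drop (k + 1) = rest := by
      have h1 : letters.drop (k + 1) = (letters.drop k).drop 1 := by
        rw [List.drop_drop]
      rw [h1, hdrop]; rfl
    rw [List.zipIdx_cons, List.map_cons, List.length_cons, List.range'_succ,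
      List.map_cons, ih (k + 1) hdrop']
    congr 1
    unfold bCell
    rw [hgetD]

theorem get_smarts_spec_aux (smiles : String) :
    get_smarts smiles = get_smarts_alt smiles := by
  by_cases h2 : (smiles.toList.length == 2) = true
  · simp only [get_smarts, get_smarts_alt, h2, if_true]
  · have h2' : (smiles.toList.length == 2) = false := by simpa using h2
    simp only [get_smarts, get_smarts_alt, h2', Bool.false_eq_true, if_false]
    congr 1
    rw [loopA_inv smiles.toList smiles.toList 0 false [] (by simp) (by simp)
      (Or.inr ⟨by simp, rfl⟩)]
    rw [zip_bridge smiles.toList smiles.toList 0 (by simp)]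
    simp [bCells, List.range_eq_range']

-- ===== VERDICT (by name: the statement is the Claim_ definition above) =====
theorem get_smarts_spec : Claim_equal_get_smarts := by
  intro smiles _
  exact get_smarts_spec_aux smiles
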